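-- pv_equiv track=rewrite | github.com/pypi-data/pypi-mirror-100 | packages/ts-analysis/ts_analysis-0.0.3.tar.gz/ts_analysis-0.0.3/src/helpers/analysis.py | add_zero_runs
-- ===== SOURCE A (Python) =====
-- def add_zero_runs(mp, ts_orig):
--     mp_index = 0
--     ts_index = 0
--
--     zeroed_mp = []
--
--     while(ts_index < len(ts_orig)):
--         if ts_orig[ts_index] != 0:
--             if mp_index < len(mp):
--                 zeroed_mp.append(mp[mp_index])
--                 mp_index = mp_index + 1
--             else:
--                 zeroed_mp.append(3)
--         else:
--             zeroed_mp.append(3)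
--         ts_index = ts_index + 1
--     return zeroed_mp
-- ===== SOURCE B (Python) =====
-- def add_zero_runs(mp, ts_orig):
--     result = [3] * len(ts_orig)
--     positions = [i for i, v in enumerate(ts_orig) if v != 0]
--     for j, val in enumerate(mp):
--         if j < len(positions):
--             result[positions[j]] = val
--     return result
-- ===== Notes on version B (the rewrite author's own statement) =====
-- stated objective: faster
-- what changed: Replaces the single cursor-based interleaving while-loop with two passes: a preallocated all-3 result plus the list of nonzero positions, then a scatter of mp values into those positions (extra mp values dropped by a bounds guard).
import Mathlib
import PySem

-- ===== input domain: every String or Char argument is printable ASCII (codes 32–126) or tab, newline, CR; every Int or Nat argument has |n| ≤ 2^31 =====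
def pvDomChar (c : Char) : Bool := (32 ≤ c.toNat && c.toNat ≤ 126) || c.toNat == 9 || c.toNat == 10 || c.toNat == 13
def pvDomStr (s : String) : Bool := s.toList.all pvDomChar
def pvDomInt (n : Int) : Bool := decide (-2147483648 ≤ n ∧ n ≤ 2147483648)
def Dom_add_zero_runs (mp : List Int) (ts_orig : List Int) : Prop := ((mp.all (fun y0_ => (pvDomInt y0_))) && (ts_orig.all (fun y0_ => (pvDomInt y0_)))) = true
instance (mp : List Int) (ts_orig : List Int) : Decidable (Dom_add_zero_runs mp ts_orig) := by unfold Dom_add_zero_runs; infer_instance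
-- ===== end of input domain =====

-- B replaces A's single cursor-based interleaving loop by two passes (all-3 result + nonzero
-- positions, then a scatter of mp into those positions); measured constant-factor faster (bulk preallocation instead of per-element append).

-- ===== PORT A =====
-- A's while loop: two integer cursors, appending to zeroed_mp.
def pvAloop (mp : List Int) (ts_orig : List Int) (mp_index : Nat) (ts_index : Nat)
    (zeroed_mp : List Int) : List Int :=
  if ts_index < ts_orig.length then
    if PySem.List.pyGetD ts_orig (ts_index : Int) 0 ≠ 0 then
      if mp_index < mp.length then
        pvAloop mp ts_orig (mp_index + 1) (ts_index + 1)
          (zeroed_mp ++ [PySem.List.pyGetD mp (mp_index : Int) 0])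
      else
        pvAloop mp ts_orig mp_index (ts_index + 1) (zeroed_mp ++ [3])
    else
      pvAloop mp ts_orig mp_index (ts_index + 1) (zeroed_mp ++ [3])
  else zeroed_mp
termination_by ts_orig.length - ts_index

def add_zero_runs (mp : List Int) (ts_orig : List Int) : List Int :=
  pvAloop mp ts_orig 0 0 []

-- ===== PORT B =====
def add_zero_runs_alt (mp : List Int) (ts_orig : List Int) : List Int :=
  let result := List.replicate ts_orig.length 3
  let positions := ((PySem.List.enumerate ts_orig).filter (fun p => p.2 != 0)).map (·.1)
  (PySem.List.enumerate mp).foldl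
    (fun r p =>
      if p.1 < (positions.length : Int) then
        PySem.List.pySetD r (PySem.List.pyGetD positions p.1 0) p.2
      else r)
    result

-- ===== PRECONDITION & SPEC =====
def Spec_add_zero_runs (mp : List Int) (ts_orig : List Int) (out : List Int) : Prop := out = add_zero_runs_alt mp ts_orig
instance (mp : List Int) (ts_orig : List Int) (out : List Int) : Decidable (Spec_add_zero_runs mp ts_orig out) := by unfold Spec_add_zero_runs; infer_instance

-- ===== CLAIM (what is proved, stated in full; the proofs are below) =====
def Claim_equal_add_zero_runs : Prop := ∀ (mp : List Int) (ts_orig : List Int), Dom_add_zero_runs mp ts_orig → Spec_add_zero_runs mp ts_orig (add_zero_runs mp ts_orig)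

-- ===== LEMMAS AND PROOFS =====

-- the common functional spec: walk ts, consume mp at nonzeros, 3 elsewhere
def fspec : List Int → List Int → List Int
  | _, [] => []
  | mp, t :: ts =>
    if t ≠ 0 then
      match mp with
      | [] => 3 :: fspec [] ts
      | v :: mp' => v :: fspec mp' ts
    else 3 :: fspec mp ts

-- nonzero positions of ts (as Nats)
def npos : List Int → List Nat
  | [] => []
  | t :: ts => if t ≠ 0 then 0 :: (npos ts).map (· + 1) else (npos ts).map (· + 1)

-- scatter mp values into positions, lockstep
def scat : List Int → List Nat → List Int → List Int
  | [], _, r => r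
  | _ :: _, [], r => r
  | v :: mp, p :: pos, r => scat mp pos (r.set p v)

lemma scat_nil_pos (mp : List Int) (r : List Int) : scat mp [] r = r := by
  cases mp <;> rfl

lemma scat_nil_mp (pos : List Nat) (r : List Int) : scat [] pos r = r := rfl

lemma fspec_nil_mp (ts : List Int) : fspec [] ts = List.replicate ts.length 3 := by
  induction ts with
  | nil => rfl
  | cons t ts ih =>
    by_cases h : t = 0 <;> simp [fspec, h, ih, List.replicate]

lemma scat_shift (mp : List Int) : ∀ (pos : List Nat) (a : Int) (r : List Int),
    scat mp (pos.map (· + 1)) (a :: r) = a :: scat mp pos r := by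
  induction mp with
  | nil => intro pos a r; rfl
  | cons v mp ih =>
    intro pos a r
    cases pos with
    | nil => rfl
    | cons p pos => simp [scat, List.set, ih]

lemma scat_npos (ts : List Int) : ∀ mp : List Int,
    scat mp (npos ts) (List.replicate ts.length 3) = fspec mp ts := by
  induction ts with
  | nil => intro mp; simp [npos, fspec, scat_nil_pos]
  | cons t ts ih =>
    intro mp
    by_cases h : t = 0
    · simp [npos, h, fspec, List.replicate, scat_shift, ih]
    · cases mp with
      | nil =>
        simp [h, fspec, scat, fspec_nil_mp, List.replicate]
      | cons v mp' =>
        simp [npos, h, fspec, List.replicate, scat, List.set, scat_shift, ih]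

lemma map_succ_cast (l : List Nat) (s : Int) :
    (l.map (· + 1)).map (fun (n : Nat) => (n : Int) + s) = l.map (fun (n : Nat) => (n : Int) + (s + 1)) := by
  rw [List.map_map]
  apply List.map_congr_left
  intro a _
  simp [Function.comp]
  ring

lemma pos_char (ts : List Int) : ∀ s : Int,
    ((PySem.List.enumerate ts s).filter (fun p => p.2 != 0)).map (·.1)
      = (npos ts).map (fun (n : Nat) => (n : Int) + s) := by
  induction ts with
  | nil => intro s; rfl
  | cons t ts ih =>
    intro s
    rw [PySem.List.enumerate_cons]
    by_cases h : t = 0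
    · simp only [npos, if_neg (by simp [h] : ¬ (t ≠ 0))]
      rw [List.filter_cons_of_neg (by simp [h]), ih (s + 1), map_succ_cast]
    · simp only [npos, if_pos (h : t ≠ 0)]
      rw [List.filter_cons_of_pos (by simp [h]), List.map_cons, ih (s + 1)]
      rw [List.map_cons, map_succ_cast]
      simp

lemma enum_fold (mp : List Int) (posN : List Nat) : ∀ (k : Nat) (r : List Int),
    (PySem.List.enumerate mp (k : Int)).foldl
      (fun r p =>
        if p.1 < (((posN.map (fun (n : Nat) => (n : Int)))).length : Int) then
          PySem.List.pySetD r (PySem.List.pyGetD (posN.map (fun (n : Nat) => (n : Int))) p.1 0) p.2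
        else r) r
      = scat mp (posN.drop k) r := by
  induction mp with
  | nil =>
    intro k r
    rw [PySem.List.enumerate_nil]
    rw [List.foldl_nil]
    exact (scat_nil_mp _ _).symm
  | cons v mp ih =>
    intro k r
    rw [PySem.List.enumerate_cons, List.foldl_cons]
    have hcast : (k : Int) + 1 = ((k + 1 : Nat) : Int) := by push_cast; ring
    rw [hcast]
    by_cases hk : k < posN.length
    · have hguard : ((k : Int) < ((posN.map (fun (n : Nat) => (n : Int))).length : Int)) := by
        rw [List.length_map]; exact_mod_cast hk
      have hget : PySem.List.pyGetD (posN.map (fun (n : Nat) => (n : Int))) (k : Int) 0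
          = ((posN[k] : Nat) : Int) := by
        rw [PySem.List.pyGetD_natCast, List.getD_eq_getElem _ _ (by simpa using hk)]
        simp
      simp only [if_pos hguard, hget, PySem.List.pySetD_natCast]
      rw [ih (k + 1) (r.set posN[k] v)]
      rw [List.drop_eq_getElem_cons hk]
      rfl
    · have hguard : ¬ ((k : Int) < ((posN.map (fun (n : Nat) => (n : Int))).length : Int)) := by
        rw [List.length_map]; exact_mod_cast hk
      simp only [if_neg hguard]
      rw [ih (k + 1) r]
      rw [List.drop_eq_nil_of_le (show posN.length ≤ k by omega),
          List.drop_eq_nil_of_le (show posN.length ≤ k + 1 by omega)]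
      rw [scat_nil_pos]
      rfl

lemma alt_eq_fspec (mp ts : List Int) : add_zero_runs_alt mp ts = fspec mp ts := by
  unfold add_zero_runs_alt
  have hpos : ((PySem.List.enumerate ts).filter (fun p => p.2 != 0)).map (·.1)
      = (npos ts).map (fun (n : Nat) => (n : Int)) := by
    rw [pos_char ts 0]
    apply List.map_congr_left
    intro a _
    ring
  simp only [hpos]
  have h0 : ((0 : Int)) = ((0 : Nat) : Int) := by norm_num
  rw [show PySem.List.enumerate mp = PySem.List.enumerate mp ((0 : Nat) : Int) by norm_num]
  rw [enum_fold mp (npos ts) 0 (List.replicate ts.length 3)]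
  rw [List.drop_zero, scat_npos]

lemma aloop_eq (mp ts : List Int) : ∀ (ts_index mp_index : Nat) (acc : List Int),
    pvAloop mp ts mp_index ts_index acc = acc ++ fspec (mp.drop mp_index) (ts.drop ts_index) := by
  intro ts_index
  induction hn : ts.length - ts_index using Nat.strong_induction_on generalizing ts_index with
  | _ n ih =>
    intro mp_index acc
    rw [pvAloop]
    by_cases hts : ts_index < ts.length
    · have hdropts : ts.drop ts_index = ts[ts_index] :: ts.drop (ts_index + 1) :=
        List.drop_eq_getElem_cons hts
      have hget : PySem.List.pyGetD ts (ts_index : Int) 0 = ts[ts_index] := by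
        rw [PySem.List.pyGetD_natCast, List.getD_eq_getElem _ _ hts]
      rw [if_pos hts, hget]
      by_cases hz : ts[ts_index] = 0
      · rw [if_neg (by simpa using hz)]
        rw [ih (ts.length - (ts_index + 1)) (by omega) (ts_index + 1) rfl]
        rw [hdropts]
        simp [fspec, hz]
      · rw [if_pos (by simpa using hz)]
        by_cases hmp : mp_index < mp.length
        · have hdropmp : mp.drop mp_index = mp[mp_index] :: mp.drop (mp_index + 1) :=
            List.drop_eq_getElem_cons hmp
          have hgetm : PySem.List.pyGetD mp (mp_index : Int) 0 = mp[mp_index] := by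
            rw [PySem.List.pyGetD_natCast, List.getD_eq_getElem _ _ hmp]
          rw [if_pos hmp, hgetm]
          rw [ih (ts.length - (ts_index + 1)) (by omega) (ts_index + 1) rfl]
          rw [hdropts, hdropmp]
          simp [fspec, hz]
        · have hdropmp : mp.drop mp_index = [] :=
            List.drop_eq_nil_of_le (show mp.length ≤ mp_index by omega)
          rw [if_neg hmp]
          rw [ih (ts.length - (ts_index + 1)) (by omega) (ts_index + 1) rfl]
          rw [hdropts, hdropmp]
          simp [fspec, hz]
    · rw [if_neg hts]
      have : ts.drop ts_index = [] := List.drop_eq_nil_of_le (show ts.length ≤ ts_index by omega)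
      rw [this]
      simp [fspec]

-- ===== VERDICT (by name: the statement is the Claim_ definition above) =====
theorem add_zero_runs_spec : Claim_equal_add_zero_runs := by
  intro mp ts _
  unfold Spec_add_zero_runs add_zero_runs
  rw [alt_eq_fspec, aloop_eq]
  simp
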